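-- pv_equiv track=rewrite | github.com/binbineow/bmi214 | src/project2/knn.py | get_n_fold
-- ===== SOURCE A (Python) =====
-- def get_n_fold(len0,n):
--     list_out = []
--     #calcualte div and mod in len0/n
--     #to even out each group
--     [div0,mod0] = divmod(len0,n)
--     #starting index
--     index0 = 0
--     #n fold
--     for _ in range(0,n):
--         if mod0 > 0:
--             #give the number one extra sample
--             list_out.append(set(range(index0,index0+1+div0)))
--             mod0 -=1
--             index0 += 1+div0
--         else:
--             list_out.append(set(range(index0,index0+div0)))
--             index0 += div0
--     #return a list of sets separting 0 to len0 to n parts with relatively even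
--     return list_out
-- ===== SOURCE B (Python) =====
-- def get_n_fold(len0, n):
--     div0, mod0 = divmod(len0, n)
--     bound = lambda i: i * div0 + min(i, mod0)
--     return [set(range(bound(i), bound(i + 1))) for i in range(n)]
-- ===== Notes on version B (the rewrite author's own statement) =====
-- stated objective: simpler
-- what changed: Replaces the stateful loop (running index0, decrementing mod0 with a branch) by a closed-form boundary formula i*div0 + min(i, mod0) and a single comprehension.
import Mathlib
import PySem

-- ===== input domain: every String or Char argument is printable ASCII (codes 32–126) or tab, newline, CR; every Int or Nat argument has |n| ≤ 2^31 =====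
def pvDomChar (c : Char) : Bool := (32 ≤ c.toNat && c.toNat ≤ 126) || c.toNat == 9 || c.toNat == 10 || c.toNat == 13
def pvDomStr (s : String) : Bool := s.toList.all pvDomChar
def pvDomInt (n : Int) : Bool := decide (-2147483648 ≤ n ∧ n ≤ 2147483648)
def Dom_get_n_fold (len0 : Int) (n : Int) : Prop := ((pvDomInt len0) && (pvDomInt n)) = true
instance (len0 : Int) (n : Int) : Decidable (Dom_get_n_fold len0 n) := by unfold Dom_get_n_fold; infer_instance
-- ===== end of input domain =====

-- B replaces A's stateful loop (running index0, decrementing mod0) by a closed-form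
-- per-index boundary formula i*div0 + min(i, mod0); objective: simpler.


-- ===== PORT A =====
-- for _ in range(0, n): the loop body updates (list_out, mod0, index0); the element is ignored.
def getNFoldLoop (div0 : Int) : List Int → List (List Int) → Int → Int → List (List Int)
  | [], list_out, _, _ => list_out
  | _ :: rest, list_out, mod0, index0 =>
    if mod0 > 0 then
      getNFoldLoop div0 rest (list_out ++ [PySem.List.pyRange index0 (index0 + 1 + div0) 1]) (mod0 - 1) (index0 + (1 + div0))
    else
      getNFoldLoop div0 rest (list_out ++ [PySem.List.pyRange index0 (index0 + div0) 1]) mod0 (index0 + div0)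

def get_n_fold (len0 : Int) (n : Int) : List (List Int) :=
  match PySem.Int.divmod? len0 n with
  | none => []   -- n = 0: ZeroDivisionError, excluded by Pre_
  | some (div0, mod0) => getNFoldLoop div0 (PySem.List.pyRange 0 n 1) [] mod0 0

-- ===== PORT B =====
def getNFoldBound (div0 mod0 i : Int) : Int := i * div0 + min i mod0

def get_n_fold_alt (len0 : Int) (n : Int) : List (List Int) :=
  match PySem.Int.divmod? len0 n with
  | none => []   -- n = 0: ZeroDivisionError, excluded by Pre_
  | some (div0, mod0) =>
    (PySem.List.pyRange 0 n 1).map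
      (fun i => PySem.List.pyRange (getNFoldBound div0 mod0 i) (getNFoldBound div0 mod0 (i + 1)) 1)

-- ===== PRECONDITION & SPEC =====
-- Pre_ excludes exactly n = 0, where Python A raises ZeroDivisionError.
def Pre_get_n_fold (len0 : Int) (n : Int) : Prop := n ≠ 0
instance (len0 : Int) (n : Int) : Decidable (Pre_get_n_fold len0 n) := by unfold Pre_get_n_fold; infer_instance
def pvWitness_get_n_fold : Int × Int := (7, 3)

def Spec_get_n_fold (len0 : Int) (n : Int) (out : List (List Int)) : Prop := out = get_n_fold_alt len0 n
instance (len0 : Int) (n : Int) (out : List (List Int)) : Decidable (Spec_get_n_fold len0 n out) := by unfold Spec_get_n_fold; infer_instance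

-- ===== CLAIM (what is proved, stated in full; the proofs are below) =====
def Claim_equal_get_n_fold : Prop := ∀ (len0 : Int) (n : Int), Dom_get_n_fold len0 n → Pre_get_n_fold len0 n → Spec_get_n_fold len0 n (get_n_fold len0 n)

-- ===== LEMMAS AND PROOFS =====

-- loop invariant: with 0 ≤ mod0, the loop appends one group per remaining element,
-- the j-th group starting at index0 + j*div0 + min j mod0.
lemma getNFoldLoop_eq (div0 : Int) (l : List Int) (acc : List (List Int)) (m idx : Int)
    (hm : 0 ≤ m) :
    getNFoldLoop div0 l acc m idx =
      acc ++ (List.range l.length).map (fun (j : Nat) =>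
        PySem.List.pyRange (idx + getNFoldBound div0 m (j : Int))
          (idx + getNFoldBound div0 m ((j : Int) + 1)) 1) := by
  induction l generalizing acc m idx with
  | nil => simp [getNFoldLoop]
  | cons x rest ih =>
    simp only [getNFoldLoop]
    by_cases hpos : m > 0
    · rw [if_pos hpos, ih _ _ _ (by omega), List.append_assoc]
      congr 1
      rw [List.length_cons, List.range_succ_eq_map]
      simp only [List.map_cons, List.map_map, List.singleton_append, Nat.cast_zero]
      congr 1
      · congr 1 <;> · simp [getNFoldBound]; omega
      · apply List.map_congr_left
        intro j _
        simp only [Function.comp_apply]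
        congr 1 <;> · simp [getNFoldBound]; ring_nf; omega
    · rw [if_neg hpos, ih _ _ _ hm, List.append_assoc]
      congr 1
      rw [List.length_cons, List.range_succ_eq_map]
      simp only [List.map_cons, List.map_map, List.singleton_append, Nat.cast_zero]
      congr 1
      · congr 1 <;> · simp [getNFoldBound]; omega
      · apply List.map_congr_left
        intro j _
        simp only [Function.comp_apply]
        congr 1 <;> · simp [getNFoldBound]; ring_nf; omega

-- ===== VERDICT (by name: the statement is the Claim_ definition above) =====
theorem get_n_fold_spec : Claim_equal_get_n_fold := by
  intro len0 n _ hn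
  unfold Spec_get_n_fold get_n_fold get_n_fold_alt
  rcases h : PySem.Int.divmod? len0 n with _ | ⟨div0, mod0⟩
  · rfl
  · simp only
    rcases lt_or_gt_of_ne hn with hneg | hpos
    · rw [PySem.List.pyRange_one_eq_nil (by omega)]
      simp [getNFoldLoop]
    · have hmod : mod0 = len0.fmod n := by
        simp [PySem.Int.divmod?] at h
        exact h.2.2.symm
      have hm : 0 ≤ mod0 := hmod ▸ Int.fmod_nonneg_of_pos len0 hpos
      rw [getNFoldLoop_eq div0 _ [] mod0 0 hm]
      rw [PySem.List.pyRange_one 0 n]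
      simp only [List.nil_append, List.length_map, List.length_range, List.map_map]
      apply List.map_congr_left
      intro j _
      simp [Function.comp_apply]
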